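-- pv_equiv track=rewrite | github.com/joaosoaressantos22/PAP | P1/funcional.py | math_union
-- ===== SOURCE A (Python) =====
-- def head(L):
--     if not L:
--         return None
--     else:
--         return L[0]
--
-- def tail(L):
--     if not L:
--         return None
--     else:
--         return L[1:]
--
-- def exists(n, L): #Onde n é o elemento e L a lista
--     if n == head(L):
--         return True
--     elif not L:
--         return False
--     else:
--         return exists(n, tail(L))
--
-- def math_union(L_1, L_2):
--     if not L_1:
--         return L_2
--     elif not L_2:
--         return L_1
--     else:
--         if not exists(head(L_2), L_1):
--             L_1.append(head(L_2))
--         return math_union(L_1, tail(L_2))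
-- ===== SOURCE B (Python) =====
-- def math_union(L_1, L_2):
--     if not L_1:
--         return L_2
--     for x in L_2:
--         if x not in L_1:
--             L_1.append(x)
--     return L_1
-- ===== Notes on version B (the rewrite author's own statement) =====
-- stated objective: simpler
-- what changed: Replaces the recursion over L_2's tail and the hand-rolled recursive exists scan with a single flat loop using the in operator (keeping A's same mutation of L_1 and its empty-L_1 behaviour of returning L_2 unchanged).
import Mathlib
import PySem

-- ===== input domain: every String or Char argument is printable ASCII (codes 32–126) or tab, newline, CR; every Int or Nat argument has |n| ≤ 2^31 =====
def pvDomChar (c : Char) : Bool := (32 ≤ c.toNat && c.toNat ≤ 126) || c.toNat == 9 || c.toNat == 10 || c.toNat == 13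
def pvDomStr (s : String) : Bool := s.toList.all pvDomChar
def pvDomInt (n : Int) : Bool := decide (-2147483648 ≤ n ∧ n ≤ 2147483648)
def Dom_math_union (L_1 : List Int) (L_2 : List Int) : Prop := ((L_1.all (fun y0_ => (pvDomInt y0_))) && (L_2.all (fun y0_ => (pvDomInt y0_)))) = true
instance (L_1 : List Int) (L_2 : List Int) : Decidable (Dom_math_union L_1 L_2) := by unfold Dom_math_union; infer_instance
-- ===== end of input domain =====

-- ===== PORT A =====
-- head(L): None on empty, else L[0]
def pyHead (L : List Int) : Option Int :=
  match L with
  | [] => none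
  | x :: _ => some x

-- exists(n, L): n == head(L) (None never equals an int), else base/recurse on tail
def pyExists (n : Int) (L : List Int) : Bool :=
  if pyHead L = some n then true
  else match L with
    | [] => false
    | _ :: t => pyExists n t

def math_union (L_1 : List Int) (L_2 : List Int) : List Int :=
  if L_1 = [] then L_2
  else match L_2 with
    | [] => L_1
    | h :: t => math_union (if pyExists h L_1 then L_1 else L_1 ++ [h]) t
termination_by L_2.length

-- ===== PORT B =====
def math_union_alt (L_1 : List Int) (L_2 : List Int) : List Int :=
  if L_1 = [] then L_2
  else L_2.foldl (fun acc x => if acc.contains x then acc else acc ++ [x]) L_1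

-- ===== PRECONDITION & SPEC =====
def Spec_math_union (L_1 : List Int) (L_2 : List Int) (out : List Int) : Prop := out = math_union_alt L_1 L_2
instance (L_1 : List Int) (L_2 : List Int) (out : List Int) : Decidable (Spec_math_union L_1 L_2 out) := by unfold Spec_math_union; infer_instance

-- ===== CLAIM (what is proved, stated in full; the proofs are below) =====
def Claim_equal_math_union : Prop := ∀ (L_1 : List Int) (L_2 : List Int), Dom_math_union L_1 L_2 → Spec_math_union L_1 L_2 (math_union L_1 L_2)

-- ===== LEMMAS AND PROOFS =====

-- ===== VERDICT (by name: the statement is the Claim_ definition above) =====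
theorem pyExists_eq_contains (n : Int) (L : List Int) : pyExists n L = L.contains n := by
  induction L with
  | nil => simp [pyExists, pyHead]
  | cons x t ih =>
      rw [pyExists.eq_def]
      by_cases h : x = n
      · simp [pyHead, h]
      · simp [pyHead, h, ih, Ne.symm h]

theorem math_union_foldl (L_2 : List Int) : ∀ L_1 : List Int, L_1 ≠ [] →
    math_union L_1 L_2 = L_2.foldl (fun acc x => if acc.contains x then acc else acc ++ [x]) L_1 := by
  induction L_2 with
  | nil => intro L_1 h; rw [math_union.eq_def]; simp [h]
  | cons x t ih =>
      intro L_1 h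
      rw [math_union.eq_def]
      simp only [if_neg h, List.foldl_cons, pyExists_eq_contains]
      apply ih
      split
      · exact h
      · simp

theorem math_union_spec : Claim_equal_math_union := by
  intro L_1 L_2 _
  unfold Spec_math_union math_union_alt
  by_cases h : L_1 = []
  · subst h; rw [math_union.eq_def]; simp
  · rw [if_neg h]; exact math_union_foldl L_2 L_1 h
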